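-- pv_equiv track=rewrite | github.com/kamanagha/PrajnaAI | pranjnaai/materials/views.py | structure_content
-- ===== SOURCE A (Python) =====
-- def structure_content(content):
--     """
--     Improved content splitter:
--     - Detect headings if line is fully uppercase or ends with ":"
--     - Merge broken lines for headings
--     - Keep numbered steps or bullets intact
--     """
--     lines = content.split("\n")
--     structured = []
--     current_heading = "Introduction"
--     current_content = []
--
--     for line in lines:
--         line = line.strip()
--         if not line:
--             continue
--
--         # New heading detection
--         is_heading = line.isupper() or line.endswith(":")
--         if is_heading:
--             # Save previous section
--             if current_content:
--                 structured.append({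
--                     "heading": current_heading,
--                     "content": "\n".join(current_content).strip()
--                 })
--             current_heading = line
--             current_content = []
--         else:
--             current_content.append(line)
--
--     # Add last section
--     if current_content:
--         structured.append({
--             "heading": current_heading,
--             "content": "\n".join(current_content).strip()
--         })
--
--     return structured
-- ===== SOURCE B (Python) =====
-- def structure_content(content):
--     """Two-phase splitter: normalize lines once, then consume alternating
--     heading/content runs (last heading of a run wins)."""
--     lines = [s for s in (ln.strip() for ln in content.split("\n")) if s]
--
--     def is_heading(s):
--         return s.isupper() or s.endswith(":")
--
--     out = []
--     heading = "Introduction"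
--     rest = lines
--     while rest:
--         # consume a (possibly empty) run of headings; the last one wins
--         k = 0
--         while k < len(rest) and is_heading(rest[k]):
--             k += 1
--         if k:
--             heading = rest[k - 1]
--         rest = rest[k:]
--         # consume a (possibly empty) run of content lines
--         k = 0
--         while k < len(rest) and not is_heading(rest[k]):
--             k += 1
--         if k:
--             out.append({"heading": heading, "content": "\n".join(rest[:k]).strip()})
--         rest = rest[k:]
--     return out
-- ===== Notes on version B (the rewrite author's own statement) =====
-- stated objective: alternative
-- what changed: Replaces A's inline accumulate/flush state machine (mutable current_heading/current_content updated per line) with a two-phase pass: normalize the lines once, then consume alternating heading/content runs via run-length scanning (last heading of a run wins), emitting one section per content run.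
import Mathlib
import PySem

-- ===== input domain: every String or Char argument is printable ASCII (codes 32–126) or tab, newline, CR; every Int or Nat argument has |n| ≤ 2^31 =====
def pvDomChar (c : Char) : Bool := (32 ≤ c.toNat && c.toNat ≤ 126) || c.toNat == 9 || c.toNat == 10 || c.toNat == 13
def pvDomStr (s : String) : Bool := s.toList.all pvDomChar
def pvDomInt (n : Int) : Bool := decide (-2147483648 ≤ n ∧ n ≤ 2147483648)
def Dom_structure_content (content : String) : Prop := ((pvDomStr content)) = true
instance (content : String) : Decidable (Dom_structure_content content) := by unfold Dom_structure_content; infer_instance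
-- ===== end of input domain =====

-- B replaces A's inline accumulate/flush state machine by a two-phase pass
-- (normalize lines once, then consume alternating heading/content runs);
-- objective: alternative decomposition, same cost.

-- shared helpers: line splitting and the heading test (identical in both Pythons)
-- s.isupper() (ASCII: some cased char, no lowercase char) or s.endswith(":")
def pvIsHeading (s : String) : Bool :=
  (s.toList.any (fun c => PySem.Chars.isupper c || PySem.Chars.islower c)
    && s.toList.all (fun c => !PySem.Chars.islower c))
  || PySem.Str.endswith s ":"

-- content.split("\n")
def pvSplitNL (content : String) : List String :=
  (PySem.Chars.splitOn content.toList ['\n']).map String.ofList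

-- ===== PORT A =====
-- the repeated "save previous section" block of A
def pvAFlush (structured : List (List (String × String))) (heading : String)
    (cur : List String) : List (List (String × String)) :=
  if cur = [] then structured
  else structured ++ [[("heading", heading),
                       ("content", PySem.Str.strip (PySem.Str.join "\n" cur))]]

-- A's for-loop over the raw lines, state = (structured, current_heading, current_content)
def pvALoop (structured : List (List (String × String))) (heading : String)
    (cur : List String) : List String → List (List (String × String))
  | [] => pvAFlush structured heading cur
  | l :: ls =>
    let s := PySem.Str.strip l
    if s = "" then pvALoop structured heading cur ls
    else if pvIsHeading s then pvALoop (pvAFlush structured heading cur) s [] ls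
    else pvALoop structured heading (cur ++ [s]) ls

def structure_content (content : String) : List (List (String × String)) :=
  pvALoop [] "Introduction" [] (pvSplitNL content)

-- ===== PORT B =====
-- decreasing lemma for B's while-loop (cited by pvBLoop's decreasing_by)
theorem pvBLoop_dec (l : String) (t : List String) :
    (List.dropWhile (fun s => !pvIsHeading s)
      (List.dropWhile pvIsHeading (l :: t))).length < (l :: t).length := by
  by_cases h : pvIsHeading l
  · have h1 : List.dropWhile pvIsHeading (l :: t) = List.dropWhile pvIsHeading t := by
      simp [h]
    rw [h1]
    have := List.length_dropWhile_le (fun s => !pvIsHeading s) (List.dropWhile pvIsHeading t)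
    have := List.length_dropWhile_le pvIsHeading t
    simp only [List.length_cons]; omega
  · have h1 : List.dropWhile pvIsHeading (l :: t) = l :: t := by
      simp [h]
    rw [h1]
    have h2 : List.dropWhile (fun s => !pvIsHeading s) (l :: t)
        = List.dropWhile (fun s => !pvIsHeading s) t := by
      simp [h]
    rw [h2]
    have := List.length_dropWhile_le (fun s => !pvIsHeading s) t
    simp only [List.length_cons]; omega

-- B's while-loop: consume a heading run (last wins), then a content run, emit, repeat
def pvBLoop (heading : String) : List String → List (List (String × String))
  | [] => []
  | l :: t =>
    let rest := l :: t
    let hs := rest.takeWhile pvIsHeading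
    let h' := hs.getLastD heading
    let r1 := rest.dropWhile pvIsHeading
    let cs := r1.takeWhile (fun s => !pvIsHeading s)
    let r2 := r1.dropWhile (fun s => !pvIsHeading s)
    (if cs = [] then []
     else [[("heading", h'),
            ("content", PySem.Str.strip (PySem.Str.join "\n" cs))]]) ++ pvBLoop h' r2
termination_by rest => rest.length
decreasing_by exact pvBLoop_dec l t

def structure_content_alt (content : String) : List (List (String × String)) :=
  pvBLoop "Introduction"
    (((pvSplitNL content).map PySem.Str.strip).filter (fun s => !(s == "")))

-- ===== PRECONDITION & SPEC =====
def Spec_structure_content (content : String) (out : List (List (String × String))) : Prop := out = structure_content_alt content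
instance (content : String) (out : List (List (String × String))) : Decidable (Spec_structure_content content out) := by unfold Spec_structure_content; infer_instance

-- ===== CLAIM (what is proved, stated in full; the proofs are below) =====
def Claim_equal_structure_content : Prop := ∀ (content : String), Dom_structure_content content → Spec_structure_content content (structure_content content)

-- ===== LEMMAS AND PROOFS =====

-- flushing is appending the flushed section
theorem pvAFlush_append (structured : List (List (String × String))) (h : String)
    (cur : List String) : pvAFlush structured h cur = structured ++ pvAFlush [] h cur := by
  unfold pvAFlush; split_ifs <;> simp

-- one step of B on a heading line just moves the heading (last-of-run-wins)
theorem pvBLoop_heading (h s : String) (c : List String) (hs : pvIsHeading s = true) :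
    pvBLoop h (s :: c) = pvBLoop s c := by
  cases c with
  | nil => simp [pvBLoop, hs]
  | cons x xs =>
    rw [pvBLoop]
    conv_rhs => rw [pvBLoop]
    simp only [List.takeWhile_cons, List.dropWhile_cons, hs, if_true, List.getLastD_cons]

-- B first consumes the content prefix, emitting at most one section
theorem pvBLoop_content (h : String) (c : List String) :
    pvBLoop h c = pvAFlush [] h (c.takeWhile (fun s => !pvIsHeading s))
      ++ pvBLoop h (c.dropWhile (fun s => !pvIsHeading s)) := by
  cases c with
  | nil => simp [pvBLoop, pvAFlush]
  | cons x xs =>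
    cases hx : pvIsHeading x with
    | true => simp [hx, pvAFlush]
    | false =>
      conv_lhs => rw [pvBLoop]
      simp [hx, pvAFlush]

-- the clean line list B works on
def pvClean (ls : List String) : List String :=
  (ls.map PySem.Str.strip).filter (fun s => !(s == ""))

-- main invariant: A's state machine = emitted prefix + B's run loop
theorem pvMain (ls : List String) (structured : List (List (String × String)))
    (h : String) (cur : List String) :
    pvALoop structured h cur ls =
      structured ++ pvAFlush [] h (cur ++ (pvClean ls).takeWhile (fun s => !pvIsHeading s))
        ++ pvBLoop h ((pvClean ls).dropWhile (fun s => !pvIsHeading s)) := by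
  induction ls generalizing structured h cur with
  | nil =>
    simp only [pvALoop, pvClean, List.map_nil, List.filter_nil, List.takeWhile_nil,
      List.dropWhile_nil, List.append_nil, pvBLoop]
    rw [pvAFlush_append]
  | cons l ls ih =>
    have hcl : pvClean (l :: ls)
        = if PySem.Str.strip l = "" then pvClean ls
          else PySem.Str.strip l :: pvClean ls := by
      simp only [pvClean, List.map_cons, List.filter_cons]
      split_ifs with h1 h2 h2 <;> simp_all
    by_cases hsE : PySem.Str.strip l = ""
    · rw [pvALoop]
      simp only [hsE, if_true, hcl]
      exact ih structured h cur
    · cases hH : pvIsHeading (PySem.Str.strip l) with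
      | false =>
        rw [pvALoop]
        simp only [hsE, if_false, hH, Bool.false_eq_true, hcl]
        rw [ih structured h (cur ++ [PySem.Str.strip l])]
        simp [hH]
      | true =>
        rw [pvALoop]
        simp only [hsE, if_false, hH, if_true, hcl]
        rw [ih (pvAFlush structured h cur) (PySem.Str.strip l) [],
          pvAFlush_append structured h cur]
        simp only [List.nil_append, List.append_assoc]
        congr 1
        simp only [List.takeWhile_cons, List.dropWhile_cons, hH, Bool.not_true,
          Bool.false_eq_true, if_false, List.append_nil]
        rw [pvBLoop_heading h (PySem.Str.strip l) (pvClean ls) hH,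
          pvBLoop_content (PySem.Str.strip l) (pvClean ls)]

-- ===== VERDICT (by name: the statement is the Claim_ definition above) =====
theorem structure_content_spec : Claim_equal_structure_content := by
  intro content _
  unfold Spec_structure_content structure_content structure_content_alt
  rw [pvMain]
  have e : (List.filter (fun s => !(s == "")) (List.map PySem.Str.strip (pvSplitNL content)))
      = pvClean (pvSplitNL content) := rfl
  rw [e, pvBLoop_content "Introduction" (pvClean (pvSplitNL content))]
  simp
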